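-- pv_equiv track=rewrite | github.com/JoaoVMansur/uri_problems.py | 1173.py | vetor
-- ===== SOURCE A (Python) =====
-- def vetor(n):
--     vetor = []
--
--     for i in range(10):
--         if i == 0:
--             vetor.append(n)
--         else:
--             vetor.append(vetor[i-1]*2)
--
--     return vetor
-- ===== SOURCE B (Python) =====
-- def vetor(n):
--     return [n * 2**i for i in range(10)]
-- ===== Notes on version B (the rewrite author's own statement) =====
-- stated objective: idiomatic
-- what changed: Replaced the stateful loop that appends double of the previous element with a closed-form comprehension computing each term independently as n times the i-th power of two.
import Mathlib
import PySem

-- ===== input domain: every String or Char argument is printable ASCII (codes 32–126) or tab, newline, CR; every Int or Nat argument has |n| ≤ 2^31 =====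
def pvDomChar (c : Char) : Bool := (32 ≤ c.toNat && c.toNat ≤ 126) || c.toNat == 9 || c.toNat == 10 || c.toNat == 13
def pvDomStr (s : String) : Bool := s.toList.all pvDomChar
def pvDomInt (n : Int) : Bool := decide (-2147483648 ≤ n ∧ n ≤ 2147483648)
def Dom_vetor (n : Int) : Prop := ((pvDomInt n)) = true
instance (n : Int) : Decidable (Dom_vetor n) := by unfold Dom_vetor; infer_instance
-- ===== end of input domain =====

-- B computes each term as a closed form n * 2^i instead of doubling the previous list element.

-- ===== PORT A =====
-- loop: for i in range(10): append n if i == 0 else vetor[i-1]*2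
-- vetor[i-1] is always in range here, so the IndexError case of pyGet? never occurs; .getD 0 is unreachable
def vetor (n : Int) : List Int :=
  (PySem.List.pyRange 0 10 1).foldl
    (fun v i => if i == 0 then v ++ [n] else v ++ [(PySem.List.pyGet? v (i - 1)).getD 0 * 2]) []

-- ===== PORT B =====
def vetor_alt (n : Int) : List Int :=
  (PySem.List.pyRange 0 10 1).map (fun i => n * 2 ^ i.toNat)

-- ===== PRECONDITION & SPEC =====
def Spec_vetor (n : Int) (out : List Int) : Prop := out = vetor_alt n
instance (n : Int) (out : List Int) : Decidable (Spec_vetor n out) := by unfold Spec_vetor; infer_instance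

-- ===== CLAIM (what is proved, stated in full; the proofs are below) =====
def Claim_equal_vetor : Prop := ∀ (n : Int), Dom_vetor n → Spec_vetor n (vetor n)

-- ===== LEMMAS AND PROOFS =====

-- ===== VERDICT (by name: the statement is the Claim_ definition above) =====
theorem vetor_spec : Claim_equal_vetor := by
  intro n _
  unfold Spec_vetor vetor vetor_alt
  simp [PySem.List.pyRange, PySem.List.pyGet?, PySem.List.pyIdx?, List.range_succ]
  ring_nf
  simp
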